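-- pv_equiv track=rewrite | github.com/brightman/nanobot-fork | usercase/workspace-sdr/skills/sdr-memory/scripts/sdr_memory.py | sanitize_user_key
-- ===== SOURCE A (Python) =====
-- def sanitize_user_key(key: str | None) -> str:
--     raw = (key or "").strip()
--     if not raw:
--         return "unknown"
--     unsafe = '<>:"/\\|?*'
--     for ch in unsafe:
--         raw = raw.replace(ch, "_")
--     raw = raw.replace("\n", "_").replace("\r", "_")
--     return raw or "unknown"
-- ===== SOURCE B (Python) =====
-- _UNSAFE = frozenset('<>:"/\\|?*\n\r')
--
--
-- def sanitize_user_key(key):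
--     raw = (key or "").strip()
--     if not raw:
--         return "unknown"
--     return "".join("_" if c in _UNSAFE else c for c in raw)
-- ===== Notes on version B (the rewrite author's own statement) =====
-- stated objective: idiomatic
-- what changed: Replaces A's eleven repeated full-string .replace scans with a single pass over the input characters using a frozenset lookup table of the unsafe characters.
import Mathlib
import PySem

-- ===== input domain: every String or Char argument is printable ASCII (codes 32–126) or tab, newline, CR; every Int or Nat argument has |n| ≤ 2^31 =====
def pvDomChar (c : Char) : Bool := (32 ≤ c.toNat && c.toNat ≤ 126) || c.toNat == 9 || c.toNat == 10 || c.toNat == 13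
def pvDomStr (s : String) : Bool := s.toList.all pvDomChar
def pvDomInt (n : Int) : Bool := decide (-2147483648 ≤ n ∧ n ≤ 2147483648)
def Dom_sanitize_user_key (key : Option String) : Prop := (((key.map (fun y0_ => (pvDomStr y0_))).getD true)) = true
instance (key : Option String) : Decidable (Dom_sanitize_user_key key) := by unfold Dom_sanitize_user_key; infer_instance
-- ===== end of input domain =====

-- B replaces A's eleven repeated full-string .replace scans with one pass over the
-- input characters and a set lookup (objective: idiomatic single traversal).

-- ===== PORT A =====
def sanitize_user_key (key : Option String) : String :=
  let raw := PySem.Str.strip (key.getD "")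
  if raw = "" then "unknown"
  else
    -- for ch in unsafe: raw = raw.replace(ch, "_")
    let raw1 := ['<', '>', ':', '"', '/', '\\', '|', '?', '*'].foldl
      (fun r ch => PySem.Str.replace r (String.ofList [ch]) "_") raw
    let raw2 := PySem.Str.replace (PySem.Str.replace raw1 "\n" "_") "\r" "_"
    if raw2 = "" then "unknown" else raw2

-- ===== PORT B =====
-- _UNSAFE = frozenset('<>:"/\\|?*\n\r')
def pvUnsafeSet : List Char :=
  PySem.Set.ofList ['<', '>', ':', '"', '/', '\\', '|', '?', '*', '\n', '\r']

def sanitize_user_key_alt (key : Option String) : String :=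
  let raw := PySem.Str.strip (key.getD "")
  if raw = "" then "unknown"
  -- "".join("_" if c in _UNSAFE else c for c in raw)
  else String.ofList (raw.toList.map (fun c => if c ∈ pvUnsafeSet then '_' else c))

-- ===== PRECONDITION & SPEC =====
def Spec_sanitize_user_key (key : Option String) (out : String) : Prop := out = sanitize_user_key_alt key
instance (key : Option String) (out : String) : Decidable (Spec_sanitize_user_key key out) := by unfold Spec_sanitize_user_key; infer_instance

-- ===== CLAIM (what is proved, stated in full; the proofs are below) =====
def Claim_equal_sanitize_user_key : Prop := ∀ (key : Option String), Dom_sanitize_user_key key → Spec_sanitize_user_key key (sanitize_user_key key)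

-- ===== LEMMAS AND PROOFS =====

-- replacing the single character ch by '_'
def pvSubst (ch c : Char) : Char := if c = ch then '_' else c

-- replace with a single-character pattern is a map
lemma replace_go_single (ch : Char) (fuel : Nat) :
    ∀ (l acc : List Char), l.length ≤ fuel →
      PySem.Chars.replace.go [ch] ['_'] fuel l acc = acc.reverse ++ l.map (pvSubst ch) := by
  induction fuel with
  | zero =>
    intro l acc h
    have : l = [] := List.length_eq_zero_iff.mp (Nat.le_zero.mp h)
    subst this; simp [PySem.Chars.replace.go]
  | succ n ih =>
    intro l acc h
    cases l with
    | nil => simp [PySem.Chars.replace.go]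
    | cons c t =>
      simp only [PySem.Chars.replace.go]
      by_cases hc : c = ch
      · subst hc
        have hpre : List.isPrefixOf [c] (c :: t) = true := by
          simp [List.isPrefixOf]
        rw [if_pos hpre]
        have := ih t ('_' :: acc) (by simpa using Nat.le_of_succ_le_succ h)
        simp only [List.length_nil, List.length_cons, List.drop_zero, List.drop_succ_cons,
          List.reverse_cons, List.reverse_nil, List.nil_append, List.singleton_append]
        rw [this]; simp [pvSubst]
      · have hpre : List.isPrefixOf [ch] (c :: t) = false := by
          simp [List.isPrefixOf]
          intro h'; exact absurd h'.symm hc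
        rw [if_neg (by simp [hpre])]
        rw [ih t (c :: acc) (by simpa using Nat.le_of_succ_le_succ h)]
        simp [pvSubst, hc]

lemma replace_single (ch : Char) (l : List Char) :
    PySem.Chars.replace l [ch] ['_'] = l.map (pvSubst ch) := by
  rw [PySem.Chars.replace]
  simp only [List.isEmpty_cons]
  exact replace_go_single ch l.length l [] le_rfl

lemma subst_comp (c : Char) :
    pvSubst '\r' (pvSubst '\n' (pvSubst '*' (pvSubst '?' (pvSubst '|' (pvSubst '\\'
      (pvSubst '/' (pvSubst '"' (pvSubst ':' (pvSubst '>' (pvSubst '<' c))))))))))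
    = if c ∈ pvUnsafeSet then '_' else c := by
  by_cases h : c ∈ pvUnsafeSet
  · rw [if_pos h]
    have := (PySem.Set.mem_ofList _ _).mp h
    simp only [List.mem_cons, List.not_mem_nil, or_false] at this
    rcases this with h|h|h|h|h|h|h|h|h|h|h <;> subst h <;> decide
  · rw [if_neg h]
    have : c ∉ ['<', '>', ':', '"', '/', '\\', '|', '?', '*', '\n', '\r'] :=
      fun hm => h ((PySem.Set.mem_ofList _ _).mpr hm)
    simp only [List.mem_cons, List.not_mem_nil, or_false, not_or] at this
    obtain ⟨h1,h2,h3,h4,h5,h6,h7,h8,h9,h10,h11⟩ := this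
    simp [pvSubst, h1,h2,h3,h4,h5,h6,h7,h8,h9,h10,h11]

lemma maps_chain (l : List Char) :
    (((((((((((l.map (pvSubst '<')).map (pvSubst '>')).map (pvSubst ':')).map
      (pvSubst '"')).map (pvSubst '/')).map (pvSubst '\\')).map (pvSubst '|')).map
      (pvSubst '?')).map (pvSubst '*')).map (pvSubst '\n')).map (pvSubst '\r'))
    = l.map (fun c => if c ∈ pvUnsafeSet then '_' else c) := by
  induction l with
  | nil => rfl
  | cons c t ih =>
    simp only [List.map_cons]
    rw [ih, subst_comp c]

-- the chain of replaces over the unsafe characters is the single-pass map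
lemma chain_eq_map (raw : String) :
    (PySem.Str.replace (PySem.Str.replace
      (['<', '>', ':', '"', '/', '\\', '|', '?', '*'].foldl
        (fun r ch => PySem.Str.replace r (String.ofList [ch]) "_") raw) "\n" "_") "\r" "_")
    = String.ofList (raw.toList.map (fun c => if c ∈ pvUnsafeSet then '_' else c)) := by
  simp only [List.foldl_cons, List.foldl_nil]
  refine Eq.trans (String.ofList_toList).symm (congrArg String.ofList ?_)
  have h1 : ("_" : String).toList = ['_'] := by decide
  have h2 : ("\n" : String).toList = ['\n'] := by decide
  have h3 : ("\r" : String).toList = ['\r'] := by decide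
  simp only [PySem.Str.toList_replace, String.toList_ofList, h1, h2, h3]
  simp only [replace_single]
  exact maps_chain raw.toList

lemma result_ne_empty (raw : String) (h : raw ≠ "") :
    String.ofList (raw.toList.map (fun c => if c ∈ pvUnsafeSet then '_' else c)) ≠ "" := by
  intro hc
  apply h
  have h0 : (String.ofList (raw.toList.map (fun c => if c ∈ pvUnsafeSet then '_' else c))).toList = [] := by
    rw [hc]; decide
  rw [String.toList_ofList] at h0
  exact String.toList_eq_nil_iff.mp (List.map_eq_nil_iff.mp h0) ▸ rfl

-- ===== VERDICT (by name: the statement is the Claim_ definition above) =====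
theorem sanitize_user_key_spec : Claim_equal_sanitize_user_key := by
  intro key _
  unfold Spec_sanitize_user_key sanitize_user_key sanitize_user_key_alt
  set raw := PySem.Str.strip (key.getD "") with hraw
  by_cases h : raw = ""
  · simp [h]
  · simp only [if_neg h]
    rw [chain_eq_map raw]
    rw [if_neg (result_ne_empty raw h)]
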